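-- pv_equiv track=rewrite | github.com/villeb/Fundamentals-of-Programming-and-Computer-Science | Search/labb4X2.py | riffel
-- ===== SOURCE A (Python) =====
-- def riffel(seq):
--     lista=[]
--     a=seq[:(len(seq))//2] #  halva listan, ( mindre än  mitten)
--     b=seq[(len(seq))//2:len(seq)] # halva listan (större än mitten)
--     for i in range(len(seq)):
--         if i%2==0: # Alla jämna tal
--             lista.append(b[i//2])
--         else: lista.append(a[i//2]) # lägg in alla tal i varannan ordning
--
--     return lista
-- ===== SOURCE B (Python) =====
-- def riffel(seq):
--     mid = len(seq) // 2
--     a = seq[:mid]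
--     b = seq[mid:]
--     result = [None] * len(seq)
--     result[0::2] = b
--     result[1::2] = a
--     return result
-- ===== Notes on version B (the rewrite author's own statement) =====
-- stated objective: idiomatic
-- what changed: Replaces the per-index parity-branch loop (appending b[i//2] or a[i//2]) with strided slice assignment: the two halves are placed into the even and odd slots of a preallocated list in two bulk C-level operations.
import Mathlib
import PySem

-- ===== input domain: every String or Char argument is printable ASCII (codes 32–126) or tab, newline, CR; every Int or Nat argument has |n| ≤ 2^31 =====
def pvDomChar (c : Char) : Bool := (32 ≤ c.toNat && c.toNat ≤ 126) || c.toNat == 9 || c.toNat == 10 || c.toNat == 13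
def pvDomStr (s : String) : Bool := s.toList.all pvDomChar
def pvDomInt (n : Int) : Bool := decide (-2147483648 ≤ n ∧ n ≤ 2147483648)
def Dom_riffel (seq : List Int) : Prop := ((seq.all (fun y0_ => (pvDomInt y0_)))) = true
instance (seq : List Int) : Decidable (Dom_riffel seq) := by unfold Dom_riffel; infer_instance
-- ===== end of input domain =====

-- B replaces A's per-index parity-branch loop by placing the two halves into the even/odd
-- slots in two bulk strided assignments (objective: idiomatic); return values proved equal.

-- ===== PORT A =====
def riffel (seq : List Int) : List Int :=
  -- lista=[]; a=seq[:len//2]; b=seq[len//2:len]; for i in range(len): parity branch append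
  let a := PySem.List.slice seq none (some (PySem.Int.floordiv (seq.length : Int) 2))
  let b := PySem.List.slice seq (some (PySem.Int.floordiv (seq.length : Int) 2))
             (some (seq.length : Int))
  (PySem.List.pyRange 0 (seq.length : Int) 1).foldl
    (fun lista i =>
      if PySem.Int.mod i 2 = 0 then
        lista ++ [PySem.List.pyGetD b (PySem.Int.floordiv i 2) 0]   -- index always in range
      else
        lista ++ [PySem.List.pyGetD a (PySem.Int.floordiv i 2) 0])  -- index always in range
    []

-- ===== PORT B =====
-- 'result[0::2] = b; result[1::2] = a' fills even slots from b and odd slots from a: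
-- alternately take the next element of b and of a, starting with b.
def pvWeave : List Int → List Int → List Int
  | [], ys => ys
  | x :: xs, ys => x :: pvWeave ys xs
termination_by xs ys => xs.length + ys.length

def riffel_alt (seq : List Int) : List Int :=
  let mid := PySem.Int.floordiv (seq.length : Int) 2
  let a := PySem.List.slice seq none (some mid)
  let b := PySem.List.slice seq (some mid) none
  pvWeave b a

-- ===== PRECONDITION & SPEC =====
def Spec_riffel (seq : List Int) (out : List Int) : Prop := out = riffel_alt seq
instance (seq : List Int) (out : List Int) : Decidable (Spec_riffel seq out) := by unfold Spec_riffel; infer_instance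

-- ===== CLAIM (what is proved, stated in full; the proofs are below) =====
def Claim_equal_riffel : Prop := ∀ (seq : List Int), Dom_riffel seq → Spec_riffel seq (riffel seq)

-- ===== LEMMAS AND PROOFS =====

theorem pvWeave_cons_cons (x y : Int) (xs ys : List Int) :
    pvWeave (x :: xs) (y :: ys) = x :: y :: pvWeave xs ys := by
  rw [pvWeave, pvWeave]

-- A's index loop, in Nat form, produces exactly the weave of the two halves.
theorem pv_key : ∀ (a b : List Int), (b.length = a.length ∨ b.length = a.length + 1) →
    (List.range (a.length + b.length)).map
      (fun k => if k % 2 = 0 then b.getD (k / 2) 0 else a.getD (k / 2) 0)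
      = pvWeave b a := by
  intro a
  induction a with
  | nil =>
    intro b hb
    rcases hb with h | h
    · rw [List.length_eq_zero_iff.mp h]; simp [pvWeave]
    · rcases b with _ | ⟨x, b'⟩
      · simp at h
      · have : b' = [] := by simpa using h
        subst this; simp [pvWeave, List.range_succ]
  | cons y ys ih =>
    intro b hb
    rcases b with _ | ⟨x, xs⟩
    · simp only [List.length_nil, List.length_cons] at hb; omega
    · have hlen : xs.length = ys.length ∨ xs.length = ys.length + 1 := by
        simp at hb; omega
      have hn : (y :: ys).length + (x :: xs).length = (ys.length + xs.length) + 1 + 1 := by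
        simp; omega
      rw [hn, pvWeave_cons_cons, ← ih xs hlen]
      rw [List.range_succ_eq_map, List.range_succ_eq_map]
      simp only [List.map_cons, List.map_map]
      congr 1
      · congr 1
        apply List.map_congr_left
        intro k _
        simp only [Function.comp]
        have h1 : (k + 1 + 1) % 2 = k % 2 := by omega
        have h2 : (k + 1 + 1) / 2 = k / 2 + 1 := by omega
        rw [h1, h2]
        by_cases hk : k % 2 = 0 <;> simp [hk]

theorem riffel_eq (seq : List Int) : riffel seq = riffel_alt seq := by
  unfold riffel riffel_alt
  set n := seq.length with hn
  have hmid : PySem.Int.floordiv (n : Int) 2 = ((n / 2 : Nat) : Int) :=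
    PySem.Int.floordiv_natCast n 2
  have ha : PySem.List.slice seq none (some (PySem.Int.floordiv (n : Int) 2))
      = seq.take (n / 2) := by
    rw [hmid, PySem.List.slice_to seq (by positivity), Int.toNat_natCast]
  have hb2 : PySem.List.slice seq (some (PySem.Int.floordiv (n : Int) 2)) none
      = seq.drop (n / 2) := by
    rw [hmid, PySem.List.slice_from seq (by positivity), Int.toNat_natCast]
  have hb : PySem.List.slice seq (some (PySem.Int.floordiv (n : Int) 2)) (some (n : Int))
      = seq.drop (n / 2) := by
    rw [hmid, PySem.List.slice_toNat seq (by positivity) (by positivity),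
        Int.toNat_natCast, Int.toNat_natCast]
    apply List.take_of_length_le
    simp [hn]
  simp only [ha, hb, hb2]
  have hstep : (fun (lista : List Int) (i : Int) =>
      if PySem.Int.mod i 2 = 0 then
        lista ++ [PySem.List.pyGetD (seq.drop (n / 2)) (PySem.Int.floordiv i 2) 0]
      else
        lista ++ [PySem.List.pyGetD (seq.take (n / 2)) (PySem.Int.floordiv i 2) 0])
      = fun lista i => lista ++
        [if PySem.Int.mod i 2 = 0 then
           PySem.List.pyGetD (seq.drop (n / 2)) (PySem.Int.floordiv i 2) 0
         else PySem.List.pyGetD (seq.take (n / 2)) (PySem.Int.floordiv i 2) 0] := by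
    funext l i; split_ifs <;> rfl
  rw [hstep, PySem.List.foldl_append_singleton_eq_map, List.nil_append,
      PySem.List.pyRange_zero_nat, List.map_map]
  have hlen : (seq.drop (n / 2)).length = (seq.take (n / 2)).length ∨
      (seq.drop (n / 2)).length = (seq.take (n / 2)).length + 1 := by
    simp [hn]; omega
  have hsum : (seq.take (n / 2)).length + (seq.drop (n / 2)).length = n := by
    simp [hn]; omega
  rw [← pv_key (seq.take (n / 2)) (seq.drop (n / 2)) hlen, hsum]
  apply List.map_congr_left
  intro k _
  simp only [Function.comp]
  have hm : PySem.Int.mod (↑k) 2 = ((k % 2 : Nat) : Int) := by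
    exact_mod_cast PySem.Int.mod_natCast k 2
  have hd : PySem.Int.floordiv (↑k) 2 = ((k / 2 : Nat) : Int) := by
    exact_mod_cast PySem.Int.floordiv_natCast k 2
  rw [hm, hd, PySem.List.pyGetD_natCast, PySem.List.pyGetD_natCast]
  by_cases hk : k % 2 = 0
  · rw [if_pos (show ((k % 2 : Nat) : Int) = 0 by exact_mod_cast hk), if_pos hk]
  · rw [if_neg (show ((k % 2 : Nat) : Int) ≠ 0 by exact_mod_cast hk), if_neg hk]

-- ===== VERDICT (by name: the statement is the Claim_ definition above) =====
theorem riffel_spec : Claim_equal_riffel := by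
  intro seq _
  unfold Spec_riffel
  exact riffel_eq seq
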